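-- pv_equiv track=rewrite | github.com/oliverflood/advent-of-code-2024 | day21b.py | d_d
-- ===== SOURCE A (Python) =====
-- dic = {'<': {'<': "A", '^': ">^A", '>': ">>A", 'v': ">A", 'A': ">>^A"},
-- 		'^': {'<': "v<A", '^': "A", '>': "v>A", 'v': "vA", 'A': ">A"},
-- 		'>': {'<': "<<A", '^': "<^A", '>': "A", 'v': "<A", 'A': "^A"},
-- 		'v': {'<': "<A", '^': "^A", '>': ">A", 'v': "A", 'A': "^>A"},
-- 		'A': {'<': "v<<A", '^': "<A", '>': "vA", 'v': "<vA", 'A': "A"}}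
--
-- def d_d(s): # s is a dict now
-- 	s_dict = {}
--
-- 	for key, value in s.items():
-- 		l = key[0]
-- 		r = key[1]
-- 		chunk = dic[l][r]
-- 		assert(len(key) == 2)
--
-- 		# s_dict[cl+cr] = s_dict.get(cl+cr, 0) + mdic[cl][cr]
-- 		for i in range(len(chunk)):
-- 			# cl = chunk[i-1] if i > 0 else 'A'
-- 			cl = 'A' if i == 0 else chunk[i-1]
-- 			cr = chunk[i]
-- 			s_dict[cl+cr] = s_dict.get(cl+cr, 0) + value
--
-- 	return s_dict
-- ===== SOURCE B (Python) =====
-- dic = {'<': {'<': "A", '^': ">^A", '>': ">>A", 'v': ">A", 'A': ">>^A"},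
-- 		'^': {'<': "v<A", '^': "A", '>': "v>A", 'v': "vA", 'A': ">A"},
-- 		'>': {'<': "<<A", '^': "<^A", '>': "A", 'v': "<A", 'A': "^A"},
-- 		'v': {'<': "<A", '^': "^A", '>': ">A", 'v': "A", 'A': "^>A"},
-- 		'A': {'<': "v<<A", '^': "<A", '>': "vA", 'v': "<vA", 'A': "A"}}
--
-- # Precomputed once: for every 2-key transition, the multiset of adjacent pairs of its expansion chunk.
-- _TRANS = {}
-- for _l, _row in dic.items():
--     for _r, _chunk in _row.items():
--         _ctr = {}
--         for _a, _b in zip('A' + _chunk, _chunk):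
--             _ctr[_a + _b] = _ctr.get(_a + _b, 0) + 1
--         _TRANS[_l + _r] = _ctr
--
-- def d_d(s):
--     s_dict = {}
--     for key, value in s.items():
--         for pair, cnt in _TRANS[key].items():
--             s_dict[pair] = s_dict.get(pair, 0) + cnt * value
--     return s_dict
-- ===== Notes on version B (the rewrite author's own statement) =====
-- stated objective: alternative
-- what changed: B precomputes at module scope a table mapping each 2-char key to the pair-counts of its expansion chunk, so d_d replaces A's per-character index scan (with its i==0 branch and string indexing) by a single table lookup plus a weighted dict merge.
import Mathlib
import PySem

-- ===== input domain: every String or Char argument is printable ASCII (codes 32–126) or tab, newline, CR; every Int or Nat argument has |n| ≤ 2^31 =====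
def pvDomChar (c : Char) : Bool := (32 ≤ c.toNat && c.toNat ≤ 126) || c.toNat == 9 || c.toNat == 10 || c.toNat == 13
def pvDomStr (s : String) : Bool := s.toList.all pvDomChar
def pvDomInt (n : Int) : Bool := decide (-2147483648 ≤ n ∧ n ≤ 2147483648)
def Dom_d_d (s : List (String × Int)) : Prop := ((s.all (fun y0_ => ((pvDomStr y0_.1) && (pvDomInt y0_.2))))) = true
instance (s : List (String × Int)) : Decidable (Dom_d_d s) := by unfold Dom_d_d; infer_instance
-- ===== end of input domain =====

-- B replaces A's per-character inner scan with a module-level precomputed table _TRANS mapping each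
-- 2-char key to the pair-counts of its expansion chunk, merged with a weighted dict update (objective: alternative).

-- ===== PORT A =====
def dicA : PySem.Dict Char (PySem.Dict Char String) := PySem.Dict.ofList [
  ('<', PySem.Dict.ofList [('<', "A"), ('^', ">^A"), ('>', ">>A"), ('v', ">A"), ('A', ">>^A")]),
  ('^', PySem.Dict.ofList [('<', "v<A"), ('^', "A"), ('>', "v>A"), ('v', "vA"), ('A', ">A")]),
  ('>', PySem.Dict.ofList [('<', "<<A"), ('^', "<^A"), ('>', "A"), ('v', "<A"), ('A', "^A")]),
  ('v', PySem.Dict.ofList [('<', "<A"), ('^', "^A"), ('>', ">A"), ('v', "A"), ('A', "^>A")]),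
  ('A', PySem.Dict.ofList [('<', "v<<A"), ('^', "<A"), ('>', "vA"), ('v', "<vA"), ('A', "A")])]

-- the inner 'for i in range(len(chunk))' loop of A
def dstepA (d : PySem.Dict String Int) (value : Int) (chunk : String) : PySem.Dict String Int :=
  (PySem.List.pyRange 0 (PySem.Str.len chunk) 1).foldl (fun sd i =>
    let cl : Char := if i = 0 then 'A' else (PySem.Str.pyGet? chunk (i - 1)).getD 'A'
    let cr : Char := (PySem.Str.pyGet? chunk i).getD 'A'
    let p : String := String.ofList [cl, cr]
    sd.insert p (sd.getD p 0 + value)) d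

def d_d (s : List (String × Int)) : List (String × Int) :=
  (s.foldl (fun sd kv =>
    match PySem.Str.pyGet? kv.1 0, PySem.Str.pyGet? kv.1 1 with
    | some l, some r =>
      match (dicA.get? l).bind (fun row => row.get? r) with
      | some chunk => if PySem.Str.len kv.1 = 2 then dstepA sd kv.2 chunk else sd
      | none => sd
    | _, _ => sd) PySem.Dict.empty).items

-- ===== PORT B =====
-- the pair-counter built for one chunk (the _ctr loop of Source B)
def pairCounter (chunk : String) : PySem.Dict String Int :=
  (List.zip ('A' :: chunk.toList) chunk.toList).foldl (fun c ab =>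
    let p : String := String.ofList [ab.1, ab.2]
    c.insert p (c.getD p 0 + 1)) PySem.Dict.empty

-- the module-level _TRANS table of Source B
def transB : PySem.Dict String (PySem.Dict String Int) :=
  dicA.items.foldl (fun t lrow =>
    lrow.2.items.foldl (fun t rc => t.insert (String.ofList [lrow.1, rc.1]) (pairCounter rc.2)) t)
    PySem.Dict.empty

def d_d_alt (s : List (String × Int)) : List (String × Int) :=
  (s.foldl (fun sd kv =>
    match transB.get? kv.1 with
    | some ctr => ctr.items.foldl (fun sd pc =>
        sd.insert pc.1 (sd.getD pc.1 0 + pc.2 * kv.2)) sd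
    | none => sd) PySem.Dict.empty).items

-- ===== PRECONDITION & SPEC =====
def validKeys : List String :=
  ["<<", "<^", "<>", "<v", "<A", "^<", "^^", "^>", "^v", "^A", "><", ">^", ">>", ">v", ">A",
   "v<", "v^", "v>", "vv", "vA", "A<", "A^", "A>", "Av", "AA"]

-- Pre_ excludes keys on which A raises (length ≠ 2 or a character outside dic), and duplicate keys,
-- on which the association list is not a faithful image of the Python dict A and B receive.
def Pre_d_d (s : List (String × Int)) : Prop :=
  (∀ kv ∈ s, kv.1 ∈ validKeys) ∧ (s.map Prod.fst).Nodup
instance (s : List (String × Int)) : Decidable (Pre_d_d s) := by unfold Pre_d_d; infer_instance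

def pvWitness_d_d : (List (String × Int)) := [("A<", 3), ("vA", -2)]

def Spec_d_d (s : List (String × Int)) (out : List (String × Int)) : Prop := out = d_d_alt s
instance (s : List (String × Int)) (out : List (String × Int)) : Decidable (Spec_d_d s out) := by unfold Spec_d_d; infer_instance

-- ===== CLAIM (what is proved, stated in full; the proofs are below) =====
def Claim_equal_d_d : Prop := ∀ (s : List (String × Int)), Dom_d_d s → Pre_d_d s → Spec_d_d s (d_d s)

-- ===== LEMMAS AND PROOFS =====

-- a weighted merge whose weights are all 1 is the plain merge
theorem wfold (l : List (String × Int)) (d : PySem.Dict String Int) (v : Int)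
    (h : ∀ pc ∈ l, pc.2 = (1 : Int)) :
    l.foldl (fun sd pc => sd.insert pc.1 (sd.getD pc.1 0 + pc.2 * v)) d
      = l.foldl (fun sd pc => sd.insert pc.1 (sd.getD pc.1 0 + v)) d := by
  induction l generalizing d with
  | nil => rfl
  | cons pc l ih =>
    simp only [List.foldl_cons]
    rw [h pc (List.mem_cons_self), one_mul]
    exact ih _ (fun q hq => h q (List.mem_cons_of_mem _ hq))

-- per-key equality of the two loop bodies, for every valid key
theorem step_eq (k : String) (hk : k ∈ validKeys) (d : PySem.Dict String Int) (v : Int) :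
    (match PySem.Str.pyGet? k 0, PySem.Str.pyGet? k 1 with
      | some l, some r =>
        match (dicA.get? l).bind (fun row => row.get? r) with
        | some chunk => if PySem.Str.len k = 2 then dstepA d v chunk else d
        | none => d
      | _, _ => d) =
    (match transB.get? k with
      | some ctr => ctr.items.foldl (fun sd pc =>
          sd.insert pc.1 (sd.getD pc.1 0 + pc.2 * v)) d
      | none => d) := by
  fin_cases hk
  · exact (wfold [("AA", 1)] d v (by decide)).symm
  · exact (wfold [("A>", 1), (">^", 1), ("^A", 1)] d v (by decide)).symm
  · exact (wfold [("A>", 1), (">>", 1), (">A", 1)] d v (by decide)).symm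
  · exact (wfold [("A>", 1), (">A", 1)] d v (by decide)).symm
  · exact (wfold [("A>", 1), (">>", 1), (">^", 1), ("^A", 1)] d v (by decide)).symm
  · exact (wfold [("Av", 1), ("v<", 1), ("<A", 1)] d v (by decide)).symm
  · exact (wfold [("AA", 1)] d v (by decide)).symm
  · exact (wfold [("Av", 1), ("v>", 1), (">A", 1)] d v (by decide)).symm
  · exact (wfold [("Av", 1), ("vA", 1)] d v (by decide)).symm
  · exact (wfold [("A>", 1), (">A", 1)] d v (by decide)).symm
  · exact (wfold [("A<", 1), ("<<", 1), ("<A", 1)] d v (by decide)).symm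
  · exact (wfold [("A<", 1), ("<^", 1), ("^A", 1)] d v (by decide)).symm
  · exact (wfold [("AA", 1)] d v (by decide)).symm
  · exact (wfold [("A<", 1), ("<A", 1)] d v (by decide)).symm
  · exact (wfold [("A^", 1), ("^A", 1)] d v (by decide)).symm
  · exact (wfold [("A<", 1), ("<A", 1)] d v (by decide)).symm
  · exact (wfold [("A^", 1), ("^A", 1)] d v (by decide)).symm
  · exact (wfold [("A>", 1), (">A", 1)] d v (by decide)).symm
  · exact (wfold [("AA", 1)] d v (by decide)).symm
  · exact (wfold [("A^", 1), ("^>", 1), (">A", 1)] d v (by decide)).symm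
  · exact (wfold [("Av", 1), ("v<", 1), ("<<", 1), ("<A", 1)] d v (by decide)).symm
  · exact (wfold [("A<", 1), ("<A", 1)] d v (by decide)).symm
  · exact (wfold [("Av", 1), ("vA", 1)] d v (by decide)).symm
  · exact (wfold [("A<", 1), ("<v", 1), ("vA", 1)] d v (by decide)).symm
  · exact (wfold [("AA", 1)] d v (by decide)).symm

-- the outer loops agree step by step
theorem fold_eq (s : List (String × Int)) (d : PySem.Dict String Int)
    (h : ∀ kv ∈ s, kv.1 ∈ validKeys) :
    s.foldl (fun sd kv =>
      match PySem.Str.pyGet? kv.1 0, PySem.Str.pyGet? kv.1 1 with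
      | some l, some r =>
        match (dicA.get? l).bind (fun row => row.get? r) with
        | some chunk => if PySem.Str.len kv.1 = 2 then dstepA sd kv.2 chunk else sd
        | none => sd
      | _, _ => sd) d
      = s.foldl (fun sd kv =>
        match transB.get? kv.1 with
        | some ctr => ctr.items.foldl (fun sd pc =>
            sd.insert pc.1 (sd.getD pc.1 0 + pc.2 * kv.2)) sd
        | none => sd) d := by
  induction s generalizing d with
  | nil => rfl
  | cons kv t ih =>
    simp only [List.foldl_cons]
    rw [step_eq kv.1 (h kv (List.mem_cons_self)) d kv.2]
    exact ih _ (fun q hq => h q (List.mem_cons_of_mem _ hq))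

-- ===== VERDICT (by name: the statement is the Claim_ definition above) =====
theorem d_d_spec : Claim_equal_d_d := by
  intro s _ hpre
  unfold Spec_d_d d_d d_d_alt
  rw [fold_eq s PySem.Dict.empty (fun kv hk => hpre.1 kv hk)]
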